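-- pv_equiv track=rewrite | github.com/pgarrett-scripps/peptacular | src/peptacular/chem.py | _split_chem_formula
-- ===== SOURCE A (Python) =====
-- def _split_chem_formula(formula: str) -> list[str]:
--     """
--     Splits a chemical formula into its components. The formula is assumed to be proForma2.0 compliant, wherase the
--     isotope notation for an element and its count is enclosed in square brackets and the formula contains no
--     whitespace.
--
--     :param formula: The chemical formula.
--     :type formula: str
--
--     :return: The components of the chemical formula.
--     :rtype: list[str]
--
--     .. code-block:: python
--
--         # Split a chemical formula into its components.
--         >>> _split_chem_formula('C6H12O6')
--         ['C6H12O6']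
--
--         >>> _split_chem_formula('C6H12O-6')
--         ['C6H12O-6']
--
--         >>> _split_chem_formula('[13C6]H12O-6')
--         ['[13C6]', 'H12O-6']
--
--         >>> _split_chem_formula('[13C6]C6H12O6[13C6]')
--         ['[13C6]', 'C6H12O6', '[13C6]']
--
--     """
--     components = []
--     i = 0
--     while i < len(formula):
--         if formula[i] == '[':
--             component_start = i
--             component_end = formula.index(']', component_start)
--             components.append(formula[component_start:component_end + 1])
--             i = component_end + 1
--         else:
--             component_start = i
--             while i < len(formula) and formula[i] not in '[]':
--                 i += 1
--             components.append(formula[component_start:i])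
--     return components
-- ===== SOURCE B (Python) =====
-- def _split_chem_formula(formula: str) -> list[str]:
--     components = []
--     buf = ''
--     in_bracket = False
--     for c in formula:
--         if in_bracket:
--             buf += c
--             if c == ']':
--                 components.append(buf)
--                 buf = ''
--                 in_bracket = False
--         elif c == '[':
--             if buf:
--                 components.append(buf)
--             buf = '['
--             in_bracket = True
--         else:
--             buf += c
--     if buf:
--         components.append(buf)
--     return components
-- ===== Notes on version B (the rewrite author's own statement) =====
-- stated objective: simpler
-- what changed: A's index-based outer while loop with an inner scan, str.index search and slicing is replaced by a single forward character pass with an in_bracket flag and a token buffer (a plain state machine).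
import Mathlib
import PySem

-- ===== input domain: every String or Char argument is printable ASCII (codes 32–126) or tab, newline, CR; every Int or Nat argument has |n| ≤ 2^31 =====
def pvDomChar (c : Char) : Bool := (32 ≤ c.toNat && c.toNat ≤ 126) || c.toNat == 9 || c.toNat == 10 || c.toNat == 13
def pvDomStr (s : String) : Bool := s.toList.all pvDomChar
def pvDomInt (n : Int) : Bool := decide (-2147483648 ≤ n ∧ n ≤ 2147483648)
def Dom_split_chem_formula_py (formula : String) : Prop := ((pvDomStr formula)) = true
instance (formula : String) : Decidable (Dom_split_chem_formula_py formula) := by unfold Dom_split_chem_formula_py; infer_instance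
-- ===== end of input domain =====

-- B replaces A's index-based while loop (with str.index and slicing) by a single
-- forward character pass with an in-bracket flag and a token buffer: simpler.

-- ===== PORT A =====
-- helper for `formula.index(']', component_start)` + the slice formula[start:end+1]:
-- splits the list at the FIRST ']' (none = Python ValueError).
def splitAtRB : List Char → Option (List Char × List Char)
  | [] => none
  | c :: r => if c = ']' then some ([], r)
              else (splitAtRB r).map (fun p => (c :: p.1, p.2))

theorem splitAtRB_some {l a b : List Char} (h : splitAtRB l = some (a, b)) :
    l = a ++ ']' :: b ∧ ']' ∉ a := by
  induction l generalizing a b with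
  | nil => simp [splitAtRB] at h
  | cons c r ih =>
    by_cases hc : c = ']'
    · rw [splitAtRB, if_pos hc] at h
      obtain ⟨h1, h2⟩ := Prod.mk.injEq _ _ _ _ ▸ Option.some.inj h
      subst h1; subst h2; simp [hc]
    · rw [splitAtRB, if_neg hc] at h
      match hs : splitAtRB r with
      | none => rw [hs] at h; simp at h
      | some (a', b') =>
        rw [hs] at h
        simp only [Option.map_some] at h
        obtain ⟨h1, h2⟩ := Prod.mk.injEq _ _ _ _ ▸ Option.some.inj h
        obtain ⟨he, hn⟩ := ih hs
        subst h2
        constructor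
        · rw [← h1]; simp [he]
        · rw [← h1]
          simp only [List.mem_cons, not_or]
          exact ⟨fun he' => hc he'.symm, hn⟩

-- termination fact cited by goA's decreasing_by
theorem length_dropWhile_lt {α : Type} (p : α → Bool) (l : List α)
    (h : ¬ (l.takeWhile p).isEmpty) : (l.dropWhile p).length < l.length := by
  cases l with
  | nil => simp at h
  | cons a t =>
    by_cases hp : p a
    · simp only [List.dropWhile_cons, hp, if_pos]
      exact Nat.lt_succ_of_le (List.length_dropWhile_le p t)
    · simp [hp] at h

-- the outer `while i < len(formula)` of A, as recursion on the remaining suffix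
def goA (cs : List Char) (acc : List String) : List String :=
  match cs with
  | [] => acc
  | c :: rest =>
    if c = '[' then
      match hs : splitAtRB rest with
      | none => acc  -- Python: formula.index(']', i) raises ValueError here
      | some (a, b) =>
        goA b (acc ++ [String.ofList ('[' :: a ++ [']'])])
    else
      -- inner `while i < len(formula) and formula[i] not in '[]'`
      let run := (c :: rest).takeWhile (fun x => !(x = '[' ∨ x = ']'))
      if hrun : run.isEmpty then acc ++ [""]  -- Python diverges here (c = ']'); guard only for termination
      else goA ((c :: rest).dropWhile (fun x => !(x = '[' ∨ x = ']'))) (acc ++ [String.ofList run])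
  termination_by cs.length
  decreasing_by
  · have h := (splitAtRB_some hs).1
    subst h
    simp only [List.length_cons, List.length_append]
    omega
  · exact length_dropWhile_lt _ _ hrun

def split_chem_formula_py (formula : String) : List String := goA formula.toList []

-- ===== PORT B =====
-- the single `for c in formula` loop of B, with buffer and in-bracket flag
def goB (cs : List Char) (buf : List Char) (inb : Bool) (acc : List String) : List String :=
  match cs with
  | [] => if buf.isEmpty then acc else acc ++ [String.ofList buf]
  | c :: rest =>
    if inb then
      if c = ']' then goB rest [] false (acc ++ [String.ofList (buf ++ [c])])
      else goB rest (buf ++ [c]) true acc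
    else if c = '[' then
      goB rest ['['] true (if buf.isEmpty then acc else acc ++ [String.ofList buf])
    else goB rest (buf ++ [c]) false acc

def split_chem_formula_py_alt (formula : String) : List String := goB formula.toList [] false []

-- ===== PRECONDITION & SPEC =====
-- Pre_ is the closed-form bracket-shape condition on the input string: reading only the
-- '[' / ']' characters, every ']' closes an open bracket and every '[' is eventually closed
-- (greedily, no nesting) — exactly the proForma-compliant inputs. Outside it A never returns:
-- it raises ValueError on an unclosed '[' and loops forever on a top-level ']'.
def brOKAux (inside : Bool) : List Char → Bool
  | [] => !inside
  | c :: r => if inside then (if c = ']' then brOKAux false r else brOKAux true r)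
              else (if c = '[' then brOKAux true r else false)

def Pre_split_chem_formula_py (formula : String) : Prop :=
  brOKAux false (formula.toList.filter (fun c => c = '[' ∨ c = ']')) = true
instance (formula : String) : Decidable (Pre_split_chem_formula_py formula) := by
  unfold Pre_split_chem_formula_py; infer_instance

def pvWitness_split_chem_formula_py : String := "[13C6]C6H12O6"

def Spec_split_chem_formula_py (formula : String) (out : List String) : Prop := out = split_chem_formula_py_alt formula
instance (formula : String) (out : List String) : Decidable (Spec_split_chem_formula_py formula out) := by unfold Spec_split_chem_formula_py; infer_instance

-- ===== CLAIM (what is proved, stated in full; the proofs are below) =====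
def Claim_equal_split_chem_formula_py : Prop := ∀ (formula : String), Dom_split_chem_formula_py formula → Pre_split_chem_formula_py formula → Spec_split_chem_formula_py formula (split_chem_formula_py formula)

-- ===== LEMMAS AND PROOFS =====

-- B's loop over the inside of a bracket: consumes content up to the first ']' into buf
theorem goB_inside (content : List Char) (rem buf : List Char) (acc : List String)
    (h : ']' ∉ content) :
    goB (content ++ ']' :: rem) buf true acc
      = goB rem [] false (acc ++ [String.ofList (buf ++ content ++ [']'])]) := by
  induction content generalizing buf with
  | nil => simp [goB]
  | cons c cs ih =>
    simp only [List.mem_cons, not_or] at h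
    have hc : ¬ c = ']' := fun he => h.1 he.symm
    simp only [List.cons_append, goB, if_pos, if_neg hc, ih _ h.2, List.append_assoc,
      List.cons_append, List.nil_append]

-- B's loop over a run of ordinary characters: accumulates them into buf
theorem goB_run (run : List Char) (rem buf : List Char) (acc : List String)
    (h : ∀ c ∈ run, ¬ c = '[' ∧ ¬ c = ']') :
    goB (run ++ rem) buf false acc = goB rem (buf ++ run) false acc := by
  induction run generalizing buf with
  | nil => simp
  | cons c cs ih =>
    have hc := h c (by simp)
    simp only [List.cons_append, goB, if_neg hc.1, ih _ (fun x hx => h x (by simp [hx])),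
      List.append_assoc, List.cons_append, List.nil_append, Bool.false_eq_true, if_false]

-- flushing a nonempty buffer before a '[' (or at the end) equals emitting it now
theorem goB_flush (rem buf : List Char) (acc : List String)
    (hrem : rem = [] ∨ ∃ r, rem = '[' :: r) (hbuf : ¬ buf.isEmpty) :
    goB rem buf false acc = goB rem [] false (acc ++ [String.ofList buf]) := by
  rcases hrem with h | ⟨r, h⟩ <;> subst h <;> simp [goB, hbuf]

-- brOKAux across a completed bracket group
theorem brOK_bracket (xs ys : List Char) (h : ']' ∉ xs) :
    brOKAux true (xs ++ ']' :: ys) = brOKAux false ys := by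
  induction xs with
  | nil => simp [brOKAux]
  | cons c cs ih =>
    simp only [List.mem_cons, not_or] at h
    have hc : ¬ c = ']' := fun he => h.1 he.symm
    simp [brOKAux, hc, ih h.2]

-- brOKAux true fails when no ']' follows
theorem brOK_inside_no_rb (l : List Char) (h : ']' ∉ l) : brOKAux true l = false := by
  induction l with
  | nil => simp [brOKAux]
  | cons x xs ihx =>
    simp only [List.mem_cons, not_or] at h
    have hx : ¬ x = ']' := fun he => h.1 he.symm
    simp [brOKAux, hx, ihx h.2]

-- splitAtRB finds the first ']' whenever one exists
theorem splitAtRB_of_mem (l : List Char) (hmem : ']' ∈ l) :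
    ∃ a b, splitAtRB l = some (a, b) := by
  induction l with
  | nil => simp at hmem
  | cons x xs ihx =>
    by_cases hx : x = ']'
    · exact ⟨[], xs, by simp [splitAtRB, hx]⟩
    · have hmem' : ']' ∈ xs := by
        rcases List.mem_cons.mp hmem with he | he
        · exact absurd he.symm hx
        · exact he
      obtain ⟨a, b, hab⟩ := ihx hmem'
      exact ⟨x :: a, b, by simp [splitAtRB, hx, hab]⟩

theorem dropWhile_head_false {α : Type} (p : α → Bool) (l : List α) {x : α} {r : List α}
    (h : l.dropWhile p = x :: r) : p x = false := by
  induction l with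
  | nil => simp at h
  | cons a t ih =>
    by_cases hp : p a
    · simp only [List.dropWhile_cons, hp, if_pos] at h
      exact ih h
    · simp only [List.dropWhile_cons, hp, Bool.false_eq_true, if_false, List.cons.injEq] at h
      rw [← h.1]
      simpa using hp

theorem main_equiv (cs : List Char) (acc : List String)
    (h : brOKAux false (cs.filter (fun c => c = '[' ∨ c = ']')) = true) :
    goA cs acc = goB cs [] false acc := by
  induction hn : cs.length using Nat.strong_induction_on generalizing cs acc with
  | _ n ih =>
  match cs with
  | [] => simp [goA, goB]
  | c :: rest =>
    by_cases hc : c = '['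
    · subst hc
      have hIn : brOKAux true (List.filter (fun c => decide (c = '[' ∨ c = ']')) rest) = true := by
        simp only [List.filter_cons, decide_eq_true_eq, if_pos (Or.inl rfl), brOKAux,
          if_pos rfl, if_neg (by decide : ¬ ('[' : Char) = ']')] at h
        exact h
      rw [goA]
      simp only [if_pos rfl]
      match hs : splitAtRB rest with
      | none =>
        -- impossible under Pre_: there is a ']' after the '['
        exfalso
        have hnoRB : ']' ∉ rest := by
          intro hmem
          obtain ⟨a, b, hab⟩ := splitAtRB_of_mem rest hmem
          rw [hab] at hs; cases hs
        rw [brOK_inside_no_rb _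
          (by simp only [List.mem_filter]; intro hmem; exact hnoRB hmem.1)] at hIn
        cases hIn
      | some (a, b) =>
        obtain ⟨hre, hna⟩ := splitAtRB_some hs
        subst hre
        -- reduce goB side
        have hBstep : goB ('[' :: (a ++ ']' :: b)) [] false acc
            = goB b [] false (acc ++ [String.ofList ('[' :: a ++ [']'])]) := by
          simp only [goB, if_pos rfl, List.isEmpty_nil,
            if_neg (by decide : ¬ ('[' : Char) = ']'), reduceIte]
          rw [goB_inside a b ['['] _ hna]
          simp
        rw [hBstep]
        -- Pre_ on the remainder
        have hpre' : brOKAux false (b.filter (fun c => c = '[' ∨ c = ']')) = true := by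
          have hcons : List.filter (fun c => decide (c = '[' ∨ c = ']')) (']' :: b)
              = ']' :: List.filter (fun c => decide (c = '[' ∨ c = ']')) b := by simp
          rw [List.filter_append, hcons, brOK_bracket _ _
            (by simp only [List.mem_filter]; intro hmem; exact hna hmem.1)] at hIn
          exact hIn
        exact ih (b.length) (by subst hn; simp; omega) b _ hpre' rfl
    · -- ordinary run
      have hcr : ¬ c = ']' := by
        intro he
        subst he
        simp [List.filter_cons, brOKAux] at h
      rw [goA]
      simp only [if_neg hc]
      have hpc : (fun x => !(x = '[' ∨ x = ']')) c = true := by simp [hc, hcr]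
      have hrun_ne : ¬ ((c :: rest).takeWhile (fun x => !(x = '[' ∨ x = ']'))).isEmpty := by
        simp [List.takeWhile_cons, hc, hcr]
      simp only [dif_neg hrun_ne]
      set p : Char → Bool := (fun x => !(x = '[' ∨ x = ']')) with hp
      have hsplit : (c :: rest).takeWhile p ++ (c :: rest).dropWhile p = c :: rest :=
        List.takeWhile_append_dropWhile
      set run := (c :: rest).takeWhile p with hrun
      set rem := (c :: rest).dropWhile p with hrem
      have hmemrun : ∀ x ∈ run, ¬ x = '[' ∧ ¬ x = ']' := by
        intro x hx
        have := List.mem_takeWhile_imp hx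
        simp [hp] at this
        exact this
      have hfil : (c :: rest).filter (fun c => c = '[' ∨ c = ']')
          = rem.filter (fun c => c = '[' ∨ c = ']') := by
        conv_lhs => rw [← hsplit]
        rw [List.filter_append, List.filter_eq_nil_iff.mpr
          (by intro a ha; have := hmemrun a ha; simp [this.1, this.2]), List.nil_append]
      -- head of rem is not a p-char
      have hremhead : rem = [] ∨ ∃ r, rem = '[' :: r := by
        match hr : rem with
        | [] => exact Or.inl rfl
        | x :: r =>
          have hx : p x = false :=
            dropWhile_head_false p (c :: rest) (by rw [← hrem])
          have hx' : x = '[' ∨ x = ']' := by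
            by_contra hcon
            push_neg at hcon
            simp [hp, hcon.1, hcon.2] at hx
          rcases hx' with hx | hx
          · exact Or.inr ⟨r, by rw [hx]⟩
          · -- x = ']' contradicts Pre_ on the filtered string
            exfalso
            rw [hfil, hx] at h
            simp [List.filter_cons, brOKAux] at h
      -- reduce goB side: consume the run, then flush
      have hB : goB (c :: rest) [] false acc = goB rem [] false (acc ++ [String.ofList run]) := by
        conv_lhs => rw [← hsplit]
        rw [goB_run run rem [] acc hmemrun, List.nil_append]
        exact goB_flush rem run acc hremhead hrun_ne
      rw [hB]
      have hlen : rem.length < n := by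
        subst hn
        have h1 : run.length + rem.length = (c :: rest).length := by
          rw [← List.length_append, hsplit]
        have h2 : 0 < run.length := by
          cases hr : run with
          | nil => rw [hr] at hrun_ne; simp at hrun_ne
          | cons _ _ => simp [hr]
        omega
      exact ih rem.length hlen rem _ (by rw [← hfil]; exact h) rfl

-- ===== VERDICT (by name: the statement is the Claim_ definition above) =====
theorem split_chem_formula_py_spec : Claim_equal_split_chem_formula_py := by
  intro formula _ hpre
  unfold Spec_split_chem_formula_py split_chem_formula_py split_chem_formula_py_alt
  exact main_equiv formula.toList [] hpre
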